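-- pv_equiv track=rewrite | github.com/chick3n/pchMediaGen | Views/Filter.py | ModifyFilter
-- ===== SOURCE A (Python) =====
-- def ModifyFilter(FilterType, filters, newHeader, newValue):
--     newTuple = ()
--     for x in range(0, len(filters)):
--         if filters[x][0] == FilterType:
--             if newHeader is None:
--                 newHeader = filters[x][0]
--             if newValue is None:
--                 newValue = filters[x][1]
--             newTuple += (newHeader, newValue),
--         else:
--             newTuple += filters[x],
--
--     return newTuple
-- ===== SOURCE B (Python) =====
-- def ModifyFilter(FilterType, filters, newHeader, newValue):
--     first = next((f for f in filters if f[0] == FilterType), None)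
--     if first is None:
--         return tuple(filters)
--     h = first[0] if newHeader is None else newHeader
--     v = first[1] if newValue is None else newValue
--     return tuple((h, v) if f[0] == FilterType else f for f in filters)
-- ===== Notes on version B (the rewrite author's own statement) =====
-- stated objective: simpler
-- what changed: A threads mutable header/value state through one interleaved accumulating loop; B first finds the first matching tuple to resolve the None defaults, then maps the fixed resolved pair over the list.
import Mathlib
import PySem

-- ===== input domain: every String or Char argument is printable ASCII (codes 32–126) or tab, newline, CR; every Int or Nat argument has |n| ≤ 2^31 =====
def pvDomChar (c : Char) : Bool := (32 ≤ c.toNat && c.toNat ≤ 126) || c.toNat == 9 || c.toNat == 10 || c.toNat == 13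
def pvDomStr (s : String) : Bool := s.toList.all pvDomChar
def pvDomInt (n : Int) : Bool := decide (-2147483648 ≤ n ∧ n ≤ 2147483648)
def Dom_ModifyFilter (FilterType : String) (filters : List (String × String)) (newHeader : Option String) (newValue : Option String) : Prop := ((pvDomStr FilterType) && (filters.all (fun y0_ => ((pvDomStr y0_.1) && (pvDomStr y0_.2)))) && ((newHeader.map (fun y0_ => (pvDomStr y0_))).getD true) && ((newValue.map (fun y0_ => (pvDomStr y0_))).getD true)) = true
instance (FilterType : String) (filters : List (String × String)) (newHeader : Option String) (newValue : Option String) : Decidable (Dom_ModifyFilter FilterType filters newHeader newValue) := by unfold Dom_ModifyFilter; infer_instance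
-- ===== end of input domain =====

-- B replaces A's single stateful accumulating loop by a find-first pass that resolves the None defaults, then a map; return-value equivalence proved on the whole domain.


-- ===== PORT A =====
-- Loop of A: walks the list keeping the (possibly updated) newHeader/newValue state.
def pvLoopA (FilterType : String) (newHeader : Option String) (newValue : Option String) : List (String × String) → List (String × String)
  | [] => []
  | f :: rest =>
    if f.1 == FilterType then
      let h := match newHeader with | none => f.1 | some h => h
      let v := match newValue with | none => f.2 | some v => v
      (h, v) :: pvLoopA FilterType (some h) (some v) rest
    else
      f :: pvLoopA FilterType newHeader newValue rest

def ModifyFilter (FilterType : String) (filters : List (String × String)) (newHeader : Option String) (newValue : Option String) : List (String × String) :=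
  pvLoopA FilterType newHeader newValue filters

-- ===== PORT B =====
-- B: resolve the defaults from the first matching tuple, then map the fixed pair.
def ModifyFilter_alt (FilterType : String) (filters : List (String × String)) (newHeader : Option String) (newValue : Option String) : List (String × String) :=
  match filters.find? (fun f => f.1 == FilterType) with
  | none => filters
  | some first =>
    let h := newHeader.getD first.1
    let v := newValue.getD first.2
    filters.map (fun f => if f.1 == FilterType then (h, v) else f)

-- ===== PRECONDITION & SPEC =====
def Spec_ModifyFilter (FilterType : String) (filters : List (String × String)) (newHeader : Option String) (newValue : Option String) (out : List (String × String)) : Prop := out = ModifyFilter_alt FilterType filters newHeader newValue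
instance (FilterType : String) (filters : List (String × String)) (newHeader : Option String) (newValue : Option String) (out : List (String × String)) : Decidable (Spec_ModifyFilter FilterType filters newHeader newValue out) := by unfold Spec_ModifyFilter; infer_instance

-- ===== CLAIM (what is proved, stated in full; the proofs are below) =====
def Claim_equal_ModifyFilter : Prop := ∀ (FilterType : String) (filters : List (String × String)) (newHeader : Option String) (newValue : Option String), Dom_ModifyFilter FilterType filters newHeader newValue → Spec_ModifyFilter FilterType filters newHeader newValue (ModifyFilter FilterType filters newHeader newValue)

-- ===== LEMMAS AND PROOFS =====

-- ===== VERDICT (by name: the statement is the Claim_ definition above) =====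
-- once the state is resolved (both some), A's loop is exactly the map
theorem pvLoopA_resolved (FilterType h v : String) (fs : List (String × String)) :
    pvLoopA FilterType (some h) (some v) fs
      = fs.map (fun f => if f.1 == FilterType then (h, v) else f) := by
  induction fs with
  | nil => rfl
  | cons f rest ih =>
    by_cases hf : (f.1 == FilterType) = true <;>
      simp_all [pvLoopA]

theorem map_noop (FilterType h v : String) (fs : List (String × String))
    (hall : ∀ f ∈ fs, ¬((f.1 == FilterType) = true)) :
    fs.map (fun f => if f.1 == FilterType then (h, v) else f) = fs := by
  induction fs with
  | nil => rfl
  | cons g gs ih =>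
    have hg := hall g (by simp)
    simp only [List.map, if_neg hg, ih (fun x hx => hall x (by simp [hx]))]

theorem alt_resolved (FilterType h v : String) (fs : List (String × String)) :
    ModifyFilter_alt FilterType fs (some h) (some v)
      = fs.map (fun f => if f.1 == FilterType then (h, v) else f) := by
  unfold ModifyFilter_alt
  cases hfind : fs.find? (fun f => f.1 == FilterType) with
  | none =>
    exact (map_noop FilterType h v fs (List.find?_eq_none.mp hfind)).symm
  | some first => simp

theorem pvLoopA_eq_alt (FilterType : String) (nh nv : Option String) (fs : List (String × String)) :
    pvLoopA FilterType nh nv fs = ModifyFilter_alt FilterType fs nh nv := by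
  induction fs generalizing nh nv with
  | nil => rfl
  | cons f rest ih =>
    by_cases hf : (f.1 == FilterType) = true
    · simp only [ModifyFilter_alt, List.find?, hf, pvLoopA]
      cases nh <;> cases nv <;>
        simp_all [pvLoopA_resolved, alt_resolved, Option.getD]
    · simp only [pvLoopA, if_neg hf, ih, ModifyFilter_alt, List.find?, hf]
      cases hfind : rest.find? (fun g => g.1 == FilterType) with
      | none => simp
      | some first => simp_all

theorem ModifyFilter_spec : Claim_equal_ModifyFilter := by
  intro FT fs nh nv _
  unfold Spec_ModifyFilter ModifyFilter
  exact pvLoopA_eq_alt FT nh nv fs
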